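-- pv_equiv track=rewrite | github.com/HBalija/data-structures-and-algorithms | problem-solving-patterns/01-frequency-counters/03-frequency-counters.py | is_same_improved
-- ===== SOURCE A (Python) =====
-- def is_same_improved(lst1, lst2):
--     """
--     Better approach - O(n)
--     """
--     if len(lst1) != len(lst2):
--         return False
--
--     frequency_counter1 = {}
--     frequency_counter2 = {}
--
--     for item in lst1:
--         # set a key to 1, or add 1 to existing key
--         frequency_counter1[item] = (frequency_counter1.get(item) or 0) + 1
--
--     for item in lst2:
--         frequency_counter2[item] = (frequency_counter2.get(item) or 0) + 1
--
--     for key in frequency_counter1: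
--         # return False if key from counter 1 isn't equal to any key squared in counter 2
--         if key**2 not in frequency_counter2:
--             return False
--
--         # return False if values of these keys aren't the same
--         if frequency_counter2[key**2] != frequency_counter1[key]:
--             return False
--
--     return True
-- ===== SOURCE B (Python) =====
-- def _runs(s):
--     """Run-length encode a sorted list into [(value, run length), ...]."""
--     runs = []
--     cur, cnt = None, 0
--     for v in s:
--         if cnt and v == cur:
--             cnt += 1
--         else:
--             if cnt:
--                 runs.append((cur, cnt))
--             cur, cnt = v, 1
--     if cnt:
--         runs.append((cur, cnt))
--     return runs
--
--
-- def _lookup(runs, q):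
--     for v, c in runs:
--         if v == q:
--             return c
--     return 0
--
--
-- def is_same_improved(lst1, lst2):
--     if len(lst1) != len(lst2):
--         return False
--     rle1 = _runs(sorted(lst1))
--     rle2 = _runs(sorted(lst2))
--     for value, freq in rle1:
--         if _lookup(rle2, value * value) != freq:
--             return False
--     return True
-- ===== Notes on version B (the rewrite author's own statement) =====
-- stated objective: alternative
-- what changed: B drops both frequency dictionaries: it sorts each list, run-length encodes each sorted list into (value, run length) pairs, and for every run of lst1 checks that the run length of value**2 in lst2's encoding (found by an association-list lookup) equals it, after the same length guard.
import Mathlib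
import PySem

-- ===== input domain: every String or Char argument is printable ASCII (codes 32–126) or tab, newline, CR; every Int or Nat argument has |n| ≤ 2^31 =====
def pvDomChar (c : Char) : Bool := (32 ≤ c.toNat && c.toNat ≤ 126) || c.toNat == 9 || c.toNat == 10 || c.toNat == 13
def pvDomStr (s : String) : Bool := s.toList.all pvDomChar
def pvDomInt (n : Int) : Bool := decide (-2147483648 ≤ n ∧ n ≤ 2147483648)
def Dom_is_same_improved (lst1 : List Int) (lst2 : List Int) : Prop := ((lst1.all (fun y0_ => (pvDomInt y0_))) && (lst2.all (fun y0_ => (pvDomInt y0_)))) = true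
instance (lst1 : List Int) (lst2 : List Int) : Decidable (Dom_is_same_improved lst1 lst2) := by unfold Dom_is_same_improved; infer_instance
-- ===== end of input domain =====

-- B replaces A's two frequency dictionaries by sorting both lists, run-length encoding each, and comparing run lengths via an association-list lookup (alternative algorithm; not claimed faster).

-- ===== PORT A =====
def is_same_improved (lst1 : List Int) (lst2 : List Int) : Bool :=
  if lst1.length ≠ lst2.length then false
  else
    -- frequency_counter[item] = (frequency_counter.get(item) or 0) + 1 ;  'None or 0' and '0 or 0' are both 0, so this is getD item 0 + 1
    let fc1 : PySem.Dict Int Int := lst1.foldl (fun d item => d.insert item (d.getD item 0 + 1)) PySem.Dict.empty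
    let fc2 : PySem.Dict Int Int := lst2.foldl (fun d item => d.insert item (d.getD item 0 + 1)) PySem.Dict.empty
    -- for key in fc1: two early 'return False' tests, then 'return True'  =  all keys pass both tests
    fc1.keys.all (fun key =>
      if !(fc2.contains (key ^ 2)) then false
      else if fc2.getD (key ^ 2) 0 ≠ fc1.getD key 0 then false   -- fc2[key**2], fc1[key]: both keys present here, so getD is exact
      else true)

-- ===== PORT B =====
-- _runs loop body: state (runs, cur, cnt); 'if cnt and v == cur' (cur=None initially, so Option Int)
def pvRunsStep (st : List (Int × Int) × Option Int × Int) (v : Int) : List (Int × Int) × Option Int × Int :=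
  if st.2.2 ≠ 0 ∧ st.2.1 = some v then (st.1, st.2.1, st.2.2 + 1)
  else ((if st.2.2 ≠ 0 then st.1 ++ [(st.2.1.getD 0, st.2.2)] else st.1), some v, 1)

-- _runs: run-length encode a sorted list (loop, then final flush 'if cnt: runs.append((cur, cnt))')
def pvRuns (s : List Int) : List (Int × Int) :=
  let st := s.foldl pvRunsStep ([], none, 0)
  if st.2.2 ≠ 0 then st.1 ++ [(st.2.1.getD 0, st.2.2)] else st.1

-- _lookup: first matching value's count, else 0 (the for loop with early return, as structural recursion)
def pvLookup (runs : List (Int × Int)) (q : Int) : Int :=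
  match runs with
  | [] => 0
  | (v, c) :: rest => if v = q then c else pvLookup rest q

def is_same_improved_alt (lst1 : List Int) (lst2 : List Int) : Bool :=
  if lst1.length ≠ lst2.length then false
  else
    let rle1 := pvRuns (PySem.List.sorted lst1 (fun x => x) false)
    let rle2 := pvRuns (PySem.List.sorted lst2 (fun x => x) false)
    rle1.all (fun p => !(pvLookup rle2 (p.1 * p.1) ≠ p.2))

-- ===== PRECONDITION & SPEC =====
def Spec_is_same_improved (lst1 : List Int) (lst2 : List Int) (out : Bool) : Prop := out = is_same_improved_alt lst1 lst2
instance (lst1 : List Int) (lst2 : List Int) (out : Bool) : Decidable (Spec_is_same_improved lst1 lst2 out) := by unfold Spec_is_same_improved; infer_instance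

-- ===== CLAIM (what is proved, stated in full; the proofs are below) =====
def Claim_equal_is_same_improved : Prop := ∀ (lst1 : List Int) (lst2 : List Int), Dom_is_same_improved lst1 lst2 → Spec_is_same_improved lst1 lst2 (is_same_improved lst1 lst2)

-- ===== LEMMAS AND PROOFS =====

-- reference run-length encoding by structural recursion (proof device only)
def rleSpec : List Int → List (Int × Int)
  | [] => []
  | x :: xs => (x, 1 + ((xs.takeWhile (· == x)).length : Int)) :: rleSpec (xs.dropWhile (· == x))
  termination_by s => s.length
  decreasing_by simpa using Nat.lt_succ_of_le (List.length_dropWhile_le _ _)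

theorem pvRuns_loop (t : List Int) (runs : List (Int × Int)) (x : Int) (c : Int) (hc : c ≠ 0) (hpos : 0 < c) :
    (if (t.foldl pvRunsStep (runs, some x, c)).2.2 ≠ 0 then
        (t.foldl pvRunsStep (runs, some x, c)).1 ++ [((t.foldl pvRunsStep (runs, some x, c)).2.1.getD 0, (t.foldl pvRunsStep (runs, some x, c)).2.2)]
      else (t.foldl pvRunsStep (runs, some x, c)).1)
    = runs ++ (x, c + ((t.takeWhile (· == x)).length : Int)) :: rleSpec (t.dropWhile (· == x)) := by
  induction t generalizing runs x c with
  | nil => simp [hc, rleSpec]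
  | cons v t ih =>
    by_cases hv : x = v
    · subst hv
      rw [List.foldl_cons, show pvRunsStep (runs, some x, c) x = (runs, some x, c + 1) by
        simp [pvRunsStep, hc]]
      rw [ih runs x (c+1) (by omega) (by omega)]
      simp only [List.takeWhile_cons, beq_self_eq_true, if_true, List.dropWhile_cons,
        List.length_cons]
      rw [List.append_cancel_left_eq]
      congr 2
      push_cast
      ring
    · rw [List.foldl_cons, show pvRunsStep (runs, some x, c) v = (runs ++ [(x, c)], some v, 1) by
        simp [pvRunsStep, hv, hc]]
      rw [ih (runs ++ [(x, c)]) v 1 (by omega) (by omega)]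
      have hvx : (v == x) = false := by simp [Ne.symm hv]
      conv_rhs => rw [rleSpec.eq_def]
      simp [hvx]

theorem pvRuns_eq_rleSpec (s : List Int) : pvRuns s = rleSpec s := by
  cases s with
  | nil => rw [rleSpec.eq_def]; simp [pvRuns]
  | cons x xs =>
    unfold pvRuns
    rw [List.foldl_cons, show pvRunsStep ([], none, 0) x = ([], some x, 1) by simp [pvRunsStep]]
    rw [pvRuns_loop xs [] x 1 one_ne_zero one_pos]
    conv_rhs => rw [rleSpec.eq_def]
    simp

-- helpers about sorted tails
theorem drop_count_zero (x : Int) (xs : List Int) (hs : (x :: xs).Pairwise (· ≤ ·)) :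
    (xs.dropWhile (· == x)).count x = 0 := by
  rw [List.count_eq_zero]
  intro hmem
  cases hD : xs.dropWhile (· == x) with
  | nil => simp [hD] at hmem
  | cons d ds =>
    have hdx : ¬ d = x := by
      have hne : xs.dropWhile (· == x) ≠ [] := by simp [hD]
      have h2 := List.head_dropWhile_not (· == x) hne
      have h3 : (xs.dropWhile (· == x)).head? = some d := by rw [hD]; rfl
      rw [List.head?_eq_some_head hne] at h3
      rw [Option.some_inj.mp h3] at h2
      simpa using h2
    have hdx' : x < d := by
      have hdmem : d ∈ xs := (List.dropWhile_sublist _).subset (by rw [hD]; simp)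
      have := (List.pairwise_cons.mp hs).1 d hdmem
      omega
    -- all elements of d :: ds are ≥ d
    have hsub : (d :: ds).Pairwise (fun a b => a ≤ (b : Int)) := by
      have := (List.pairwise_cons.mp hs).2.sublist (List.dropWhile_sublist (· == x))
      rwa [hD] at this
    rw [hD] at hmem
    rcases List.mem_cons.mp hmem with h | h
    · omega
    · have := (List.pairwise_cons.mp hsub).1 x h
      omega

theorem take_all_eq (x : Int) (xs : List Int) :
    ∀ y ∈ xs.takeWhile (· == x), y = x := by
  intro y hy
  have := List.mem_takeWhile_imp hy
  simpa using this

theorem count_split (x q : Int) (xs : List Int) :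
    xs.count q = (xs.takeWhile (· == x)).count q + (xs.dropWhile (· == x)).count q := by
  conv_lhs => rw [← List.takeWhile_append_dropWhile (p := (· == x)) (l := xs)]
  exact List.count_append ..

theorem pvLookup_rleSpec (s : List Int) (hs : s.Pairwise (· ≤ ·)) (q : Int) :
    pvLookup (rleSpec s) q = (s.count q : Int) := by
  induction s using rleSpec.induct with
  | case1 => simp [rleSpec, pvLookup]
  | case2 x xs ih =>
    rw [rleSpec.eq_def]
    simp only [pvLookup]
    have hD : (xs.dropWhile (· == x)).Pairwise (fun a b => a ≤ (b : Int)) :=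
      (List.pairwise_cons.mp hs).2.sublist (List.dropWhile_sublist _)
    by_cases hq : x = q
    · subst hq
      rw [if_pos rfl, List.count_cons_self, count_split x x xs, drop_count_zero x xs hs]
      have : (xs.takeWhile (· == x)).count x = (xs.takeWhile (· == x)).length :=
        List.count_eq_length.mpr (fun y hy => by simp [take_all_eq x xs y hy])
      push_cast [this]
      ring
    · rw [if_neg hq, ih hD]
      rw [List.count_cons_of_ne hq, count_split x q xs]
      have : (xs.takeWhile (· == x)).count q = 0 :=
        List.count_eq_zero.mpr (fun hmem => hq ((take_all_eq x xs q hmem).symm))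
      simp [this]

theorem mem_rleSpec (s : List Int) (hs : s.Pairwise (· ≤ ·)) (v c : Int) :
    (v, c) ∈ rleSpec s ↔ v ∈ s ∧ c = (s.count v : Int) := by
  induction s using rleSpec.induct with
  | case1 => simp [rleSpec]
  | case2 x xs ih =>
    have hD : (xs.dropWhile (· == x)).Pairwise (fun a b => a ≤ (b : Int)) :=
      (List.pairwise_cons.mp hs).2.sublist (List.dropWhile_sublist _)
    rw [rleSpec.eq_def]
    simp only [List.mem_cons, Prod.mk.injEq, ih hD]
    constructor
    · rintro (⟨hv, hcc⟩ | ⟨hmem, hcc⟩)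
      · subst hv
        refine ⟨Or.inl rfl, ?_⟩
        rw [List.count_cons_self, count_split v v xs, drop_count_zero v xs hs]
        have : (xs.takeWhile (· == v)).count v = (xs.takeWhile (· == v)).length :=
          List.count_eq_length.mpr (fun y hy => by simp [take_all_eq v xs y hy])
        push_cast [this]
        omega
      · have hmem' : v ∈ xs := (List.dropWhile_sublist (· == x)).subset hmem
        have hvx : v ≠ x := by
          intro h; subst h
          have := drop_count_zero v xs hs
          exact absurd (List.count_pos_iff.mpr hmem) (by omega)
        refine ⟨Or.inr hmem', ?_⟩
        rw [hcc, List.count_cons_of_ne (Ne.symm hvx), count_split x v xs]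
        have : (xs.takeWhile (· == x)).count v = 0 :=
          List.count_eq_zero.mpr (fun hm => hvx ((take_all_eq x xs v hm)))
        simp [this]
    · rintro ⟨hmem, hcc⟩
      by_cases hvx : v = x
      · subst hvx
        left
        refine ⟨rfl, ?_⟩
        rw [hcc, List.count_cons_self, count_split v v xs, drop_count_zero v xs hs]
        have : (xs.takeWhile (· == v)).count v = (xs.takeWhile (· == v)).length :=
          List.count_eq_length.mpr (fun y hy => by simp [take_all_eq v xs y hy])
        push_cast [this]
        omega
      · right
        have hmem' : v ∈ xs := by
          rcases hmem with h | h
          · exact absurd h hvx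
          · exact h
        have hmemD : v ∈ xs.dropWhile (· == x) := by
          rw [← List.takeWhile_append_dropWhile (p := (· == x)) (l := xs)] at hmem'
          rcases List.mem_append.mp hmem' with h | h
          · exact absurd (take_all_eq x xs v h) hvx
          · exact h
        refine ⟨hmemD, ?_⟩
        rw [hcc, List.count_cons_of_ne (Ne.symm hvx), count_split x v xs]
        have : (xs.takeWhile (· == x)).count v = 0 :=
          List.count_eq_zero.mpr (fun hm => hvx (take_all_eq x xs v hm))
        simp [this]

theorem pv_alt_lemma (lst1 lst2 : List Int) :
    ((pvRuns (PySem.List.sorted lst1 (fun x => x) false)).all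
      (fun p => !(pvLookup (pvRuns (PySem.List.sorted lst2 (fun x => x) false)) (p.1 * p.1) ≠ p.2)))
    = lst1.all (fun x => (PySem.List.count lst2 (x * x) : Int) == (PySem.List.count lst1 x : Int)) := by
  rw [pvRuns_eq_rleSpec, pvRuns_eq_rleSpec]
  apply Bool.eq_iff_iff.mpr
  have hs1 : (PySem.List.sorted lst1 (fun x => x) false).Pairwise (fun a b => a ≤ (b : Int)) :=
    PySem.List.sorted_pairwise lst1 (fun x => x)
  have hs2 : (PySem.List.sorted lst2 (fun x => x) false).Pairwise (fun a b => a ≤ (b : Int)) :=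
    PySem.List.sorted_pairwise lst2 (fun x => x)
  have hc1 : ∀ q : Int, (PySem.List.sorted lst1 (fun x => x) false).count q = lst1.count q :=
    fun q => (PySem.List.sorted_perm lst1 (fun x => x) false).count_eq q
  have hc2 : ∀ q : Int, (PySem.List.sorted lst2 (fun x => x) false).count q = lst2.count q :=
    fun q => (PySem.List.sorted_perm lst2 (fun x => x) false).count_eq q
  simp only [List.all_eq_true, Bool.not_eq_true', decide_eq_false_iff_not, Decidable.not_not,
    beq_iff_eq, PySem.List.count_eq]
  constructor
  · intro h x hx
    have hxS : x ∈ PySem.List.sorted lst1 (fun x => x) false :=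
      (PySem.List.mem_sorted lst1 (fun x => x) false x).mpr hx
    have hpair := (mem_rleSpec _ hs1 x (((PySem.List.sorted lst1 (fun x => x) false).count x : Int))).mpr ⟨hxS, rfl⟩
    have h2 := h _ hpair
    rw [pvLookup_rleSpec _ hs2] at h2
    simp only [hc1, hc2] at h2
    exact_mod_cast h2
  · intro h p hp
    obtain ⟨hv, hc⟩ := (mem_rleSpec _ hs1 p.1 p.2).mp hp
    rw [pvLookup_rleSpec _ hs2, hc, hc1, hc2]
    have := h p.1 ((PySem.List.mem_sorted lst1 (fun x => x) false p.1).mp hv)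
    exact_mod_cast this

-- A's per-key check over the keys of counter1 equals the per-element count check over lst1
theorem pv_key_lemma (lst1 lst2 : List Int) :
    ((PySem.Set.ofList lst1 : List Int).all (fun key =>
      if !((PySem.Dict.counter lst2).contains (key ^ 2)) then false
      else if (PySem.Dict.counter lst2).getD (key ^ 2) 0 ≠ (PySem.Dict.counter lst1).getD key 0 then false
      else true))
    = lst1.all (fun x => (PySem.List.count lst2 (x * x) : Int) == (PySem.List.count lst1 x : Int)) := by
  apply Bool.eq_iff_iff.mpr
  simp only [PySem.Dict.getD_counter, PySem.Dict.contains_counter, PySem.List.count_eq,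
    List.all_eq_true, PySem.Set.mem_ofList]
  constructor
  · intro h x hx
    have hx1 := h x hx
    split_ifs at hx1 with h1 h2
    push Not at h2
    simp only [pow_two] at h2
    simp [h2]
  · intro h x hx
    have hc := h x hx
    simp only [beq_iff_eq] at hc
    have hpos : 0 < lst1.count x := List.count_pos_iff.mpr hx
    have hmem : x * x ∈ lst2 := by
      have : (0:Int) < lst2.count (x*x) := by rw [hc]; exact_mod_cast hpos
      exact_mod_cast List.count_pos_iff.mp (by exact_mod_cast this)
    split_ifs with h1 h2
    · simp only [Bool.not_eq_true', List.contains_eq_mem, decide_eq_false_iff_not, pow_two] at h1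
      exact absurd hmem h1
    · exfalso; apply h2; simp only [pow_two]; exact hc
    · rfl

-- ===== VERDICT (by name: the statement is the Claim_ definition above) =====
theorem is_same_improved_spec : Claim_equal_is_same_improved := by
  intro lst1 lst2 _
  unfold Spec_is_same_improved is_same_improved is_same_improved_alt
  by_cases h : lst1.length = lst2.length
  · simp only [h, ne_eq, not_true_eq_false, if_false,
      PySem.Dict.foldl_insert_getD_add_one_eq_counter, PySem.Dict.keys_counter]
    exact (pv_key_lemma lst1 lst2).trans (pv_alt_lemma lst1 lst2).symm
  · simp [h]
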